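-- pv_equiv track=rewrite | github.com/zm-git-dev/RNApipeline | Trinity_extract_long_seq/extract_longest_isform.py | Stat_Length_dis
-- ===== SOURCE A (Python) =====
-- def Stat_Length_dis(trans_len):
-- 	'''
-- 	统计转录本的长度分布，用于作图，起始长度为200
-- 	'''
-- 	count=[]
-- 	for i in range(2,21):
-- #		i is range from 2 to 20;
-- 		count.append(0)
-- 		for len in trans_len:
-- 			len = int(len)
-- 			if i == 20 and len >= i*100:
-- 				count[i-2] = count[i-2] +1
-- 			if 2<= i <= 19 and i*100 <= len < i*100+100:
-- 				count[i-2] = count[i-2] +1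
-- 	return count
-- ===== SOURCE B (Python) =====
-- def Stat_Length_dis(trans_len):
--     count = [0] * 19
--     for x in trans_len:
--         x = int(x)
--         if x >= 200:
--             count[min(x // 100 - 2, 18)] += 1
--     return count
-- ===== Notes on version B (the rewrite author's own statement) =====
-- stated objective: faster
-- what changed: Single pass over the data computing each value's bucket index directly by integer division (min(x//100-2,18)), instead of 19 full rescans of the list, one per bucket.
import Mathlib
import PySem

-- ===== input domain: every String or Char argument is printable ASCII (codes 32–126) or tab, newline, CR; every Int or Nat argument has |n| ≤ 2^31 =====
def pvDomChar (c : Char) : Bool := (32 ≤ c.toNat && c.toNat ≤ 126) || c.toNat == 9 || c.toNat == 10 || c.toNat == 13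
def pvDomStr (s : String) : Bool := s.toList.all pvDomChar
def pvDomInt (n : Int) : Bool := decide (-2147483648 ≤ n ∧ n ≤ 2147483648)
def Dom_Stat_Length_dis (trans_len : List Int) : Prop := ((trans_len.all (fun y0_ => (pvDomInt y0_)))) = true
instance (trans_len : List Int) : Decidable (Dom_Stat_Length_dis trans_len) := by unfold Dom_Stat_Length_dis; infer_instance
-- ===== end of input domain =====

-- B replaces A's 19 full rescans of the list (one per 100bp bucket) by a single pass that
-- computes each value's bucket index directly by integer division; same return value.

-- ===== PORT A =====
-- Faithful transliteration of A's nested loops.  Inside the loop 2 ≤ i, so the index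
-- i-2 is nonnegative and '.toNat' is exact (no Python negative-index behaviour reachable:
-- 0 ≤ i-2 < count.length at every access).
def Stat_Length_dis (trans_len : List Int) : List Int :=
  (PySem.List.pyRange 2 21 1).foldl
    (fun count i =>
      let count := count ++ [(0 : Int)]
      trans_len.foldl
        (fun count len =>
          let count :=
            if i = 20 ∧ i * 100 ≤ len then
              count.set (i - 2).toNat (count.getD (i - 2).toNat 0 + 1)
            else count
          if 2 ≤ i ∧ i ≤ 19 ∧ i * 100 ≤ len ∧ len < i * 100 + 100 then
            count.set (i - 2).toNat (count.getD (i - 2).toNat 0 + 1)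
          else count)
        count)
    []

-- ===== PORT B =====
-- Transliteration of Source B: one pass; for x ≥ 200 the bucket index min(x//100-2, 18) is
-- nonnegative, so '.toNat' is exact.
def Stat_Length_dis_alt (trans_len : List Int) : List Int :=
  trans_len.foldl
    (fun count x =>
      if 200 ≤ x then
        let j := (min (PySem.Int.floordiv x 100 - 2) 18).toNat
        count.set j (count.getD j 0 + 1)
      else count)
    (List.replicate 19 0)

-- ===== PRECONDITION & SPEC =====
def Spec_Stat_Length_dis (trans_len : List Int) (out : List Int) : Prop := out = Stat_Length_dis_alt trans_len
instance (trans_len : List Int) (out : List Int) : Decidable (Spec_Stat_Length_dis trans_len out) := by unfold Spec_Stat_Length_dis; infer_instance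

-- ===== CLAIM (what is proved, stated in full; the proofs are below) =====
def Claim_equal_Stat_Length_dis : Prop := ∀ (trans_len : List Int), Dom_Stat_Length_dis trans_len → Spec_Stat_Length_dis trans_len (Stat_Length_dis trans_len)

-- ===== LEMMAS AND PROOFS =====

-- A's membership test for bucket i (2 ≤ i ≤ 20), as the disjunction of its two ifs.
def pA (i x : Int) : Bool :=
  decide ((i = 20 ∧ i * 100 ≤ x) ∨ (2 ≤ i ∧ i ≤ 19 ∧ i * 100 ≤ x ∧ x < i * 100 + 100))

-- B's membership test for bucket j (0 ≤ j ≤ 18).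
def pB (j : Nat) (x : Int) : Bool :=
  decide (200 ≤ x ∧ (min (PySem.Int.floordiv x 100 - 2) 18).toNat = j)

theorem getD_append_last (c : List Int) (k : Int) : (c ++ [k]).getD c.length 0 = k := by
  simp [List.getD]

theorem set_append_last (c : List Int) (k v : Int) : (c ++ [k]).set c.length v = c ++ [v] := by
  rw [List.set_append_right _ _ (le_refl _)]
  simp

theorem innerA (i : Int) (hi : 2 ≤ i) (xs : List Int) :
    ∀ (c : List Int) (k : Int), c.length = (i - 2).toNat →
      xs.foldl
        (fun count len =>
          let count :=
            if i = 20 ∧ i * 100 ≤ len then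
              count.set (i - 2).toNat (count.getD (i - 2).toNat 0 + 1)
            else count
          if 2 ≤ i ∧ i ≤ 19 ∧ i * 100 ≤ len ∧ len < i * 100 + 100 then
            count.set (i - 2).toNat (count.getD (i - 2).toNat 0 + 1)
          else count)
        (c ++ [k])
      = c ++ [k + (xs.countP (pA i) : Int)] := by
  induction xs with
  | nil => intro c k hc; simp
  | cons x xs ih =>
    intro c k hc
    have hidx : (i - 2).toNat = c.length := hc.symm
    have hstep :
        (let count :=
            if i = 20 ∧ i * 100 ≤ x then
              (c ++ [k]).set (i - 2).toNat ((c ++ [k]).getD (i - 2).toNat 0 + 1)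
            else c ++ [k]
          if 2 ≤ i ∧ i ≤ 19 ∧ i * 100 ≤ x ∧ x < i * 100 + 100 then
            count.set (i - 2).toNat (count.getD (i - 2).toNat 0 + 1)
          else count)
        = c ++ [k + (if pA i x then 1 else 0)] := by
      rw [hidx]
      by_cases h1 : i = 20 ∧ i * 100 ≤ x
      · have h2 : ¬ (2 ≤ i ∧ i ≤ 19 ∧ i * 100 ≤ x ∧ x < i * 100 + 100) := by omega
        have hp : pA i x = true := by simp [pA]; omega
        simp only [if_pos h1, getD_append_last, set_append_last, if_neg h2, hp, if_pos]
      · by_cases h2 : 2 ≤ i ∧ i ≤ 19 ∧ i * 100 ≤ x ∧ x < i * 100 + 100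
        · have hp : pA i x = true := by simp [pA]; omega
          simp only [if_neg h1, if_pos h2, getD_append_last, set_append_last, hp, if_pos]
        · have hp : pA i x = false := by simp [pA]; omega
          simp only [if_neg h1, if_neg h2, hp, Bool.false_eq_true, if_false, add_zero]
    rw [List.foldl_cons, hstep, ih c _ hc, List.countP_cons]
    by_cases hp : pA i x <;> simp [hp] <;> try ring

theorem outerA (trans_len : List Int) :
    ∀ (n : Nat) (a : Int), (21 - a).toNat = n → 2 ≤ a →
      ∀ (c : List Int), c.length = (a - 2).toNat →
        (PySem.List.pyRange a 21 1).foldl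
          (fun count i =>
            let count := count ++ [(0 : Int)]
            trans_len.foldl
              (fun count len =>
                let count :=
                  if i = 20 ∧ i * 100 ≤ len then
                    count.set (i - 2).toNat (count.getD (i - 2).toNat 0 + 1)
                  else count
                if 2 ≤ i ∧ i ≤ 19 ∧ i * 100 ≤ len ∧ len < i * 100 + 100 then
                  count.set (i - 2).toNat (count.getD (i - 2).toNat 0 + 1)
                else count)
              count)
          c
        = c ++ (PySem.List.pyRange a 21 1).map (fun i => (trans_len.countP (pA i) : Int)) := by
  intro n
  induction n with
  | zero =>
    intro a ha _ c _
    have h21 : (21 : Int) ≤ a := by omega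
    rw [PySem.List.pyRange_one_eq_nil h21]
    simp
  | succ m ih =>
    intro a ha ha2 c hc
    have hlt : a < 21 := by omega
    rw [PySem.List.pyRange_one_cons hlt]
    simp only [List.foldl_cons, List.map_cons]
    rw [innerA a ha2 trans_len c 0 hc]
    have hlen : (c ++ [(0 : Int) + (trans_len.countP (pA a) : Int)]).length = (a + 1 - 2).toNat := by
      simp [hc]; omega
    rw [ih (a + 1) (by omega) (by omega) _ hlen]
    simp

theorem A_eq (trans_len : List Int) :
    Stat_Length_dis trans_len
      = (PySem.List.pyRange 2 21 1).map (fun i => (trans_len.countP (pA i) : Int)) := by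
  have := outerA trans_len 19 2 (by decide) (by norm_num) [] (by simp)
  simpa [Stat_Length_dis] using this

theorem innerB (xs : List Int) :
    ∀ (c : List Int), c.length = 19 →
      xs.foldl
        (fun count x =>
          if 200 ≤ x then
            let j := (min (PySem.Int.floordiv x 100 - 2) 18).toNat
            count.set j (count.getD j 0 + 1)
          else count)
        c
      = (List.range 19).map (fun j => c.getD j 0 + (xs.countP (pB j) : Int)) := by
  induction xs with
  | nil =>
    intro c hc
    simp only [List.foldl_nil, List.countP_nil, Nat.cast_zero, add_zero]
    apply List.ext_getElem
    · simp [hc]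
    · intro j h1 h2
      have hj : j < 19 := by simpa using h2
      simp [List.getD_eq_getElem?_getD, List.getElem?_eq_getElem h1]
  | cons x xs ih =>
    intro c hc
    rw [List.foldl_cons]
    by_cases hx : 200 ≤ x
    · set j0 : Nat := (min (PySem.Int.floordiv x 100 - 2) 18).toNat with hj0def
      have hj0 : j0 < 19 := by
        have : min (PySem.Int.floordiv x 100 - 2) 18 ≤ 18 := min_le_right _ _
        omega
      have hlen : (c.set j0 (c.getD j0 0 + 1)).length = 19 := by simp [hc]
      rw [if_pos hx, ih _ hlen]
      apply List.map_congr_left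
      intro j hj
      have hj19 : j < 19 := List.mem_range.mp hj
      have hcnt : (List.countP (pB j) (x :: xs) : Int)
          = (List.countP (pB j) xs : Int) + (if j0 = j then 1 else 0) := by
        rw [List.countP_cons]
        by_cases he : j0 = j
        · have : pB j x = true := by
            rw [pB, decide_eq_true_eq]
            exact ⟨hx, by rw [← hj0def]; exact he⟩
          simp [this, he]
        · have : pB j x = false := by
            simp only [pB, decide_eq_false_iff_not]
            rintro ⟨_, h⟩; exact he (hj0def ▸ h)
          simp [this, he]
      have hgd : (c.set j0 (c.getD j0 0 + 1)).getD j 0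
          = c.getD j 0 + (if j0 = j then 1 else 0) := by
        by_cases he : j0 = j
        · subst he
          rw [List.getD_eq_getElem _ _ (by simp [hc]; omega),
              List.getElem_set_self (by omega),
              List.getD_eq_getElem _ _ (by omega : j0 < c.length)]
          simp
        · rw [List.getD_eq_getElem _ _ (by simp [hc]; omega),
              List.getElem_set_ne he,
              List.getD_eq_getElem _ _ (by omega : j < c.length)]
          simp [he]
      rw [hcnt, hgd]; ring
    · rw [if_neg hx, ih c hc]
      apply List.map_congr_left
      intro j hj
      have : pB j x = false := by
        simp only [pB, decide_eq_false_iff_not]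
        rintro ⟨h, _⟩; exact hx h
      simp [this]

theorem B_eq (trans_len : List Int) :
    Stat_Length_dis_alt trans_len
      = (List.range 19).map (fun j => (trans_len.countP (pB j) : Int)) := by
  rw [Stat_Length_dis_alt, innerB trans_len (List.replicate 19 0) (by simp)]
  apply List.map_congr_left
  intro j hj
  have hj19 : j < 19 := List.mem_range.mp hj
  rw [List.getD_eq_getElem _ _ (by simpa using hj19), List.getElem_replicate]
  ring

theorem pred_eq (j : Nat) (hj : j < 19) : pA (2 + (j : Int)) = pB j := by
  funext x
  unfold pA pB
  rw [PySem.Int.floordiv_eq_ediv_of_pos (by norm_num : (0:Int) < 100)]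
  rw [decide_eq_decide]
  rw [Int.min_def]
  split_ifs <;> omega

-- ===== VERDICT (by name: the statement is the Claim_ definition above) =====
theorem Stat_Length_dis_spec : Claim_equal_Stat_Length_dis := by
  intro trans_len _
  unfold Spec_Stat_Length_dis
  rw [A_eq, B_eq, PySem.List.pyRange_one]
  have : ((21 : Int) - 2).toNat = 19 := by decide
  rw [this, List.map_map]
  apply List.map_congr_left
  intro j hj
  simp only [Function.comp_apply]
  rw [pred_eq j (List.mem_range.mp hj)]
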